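-- pv_equiv track=rewrite | github.com/CadmusKei/CSC211-Notes | Computer Science/PDFs&Images/Horner.py | hornersRule
-- ===== SOURCE A (Python) =====
-- def hornersRule(X,A):
--     P = 0
--
--     for digit in A:
--         if (digit.isdigit()):
--             a = int(digit)
--         else:
--             a  = ord(digit) - ord("a") + 10
--         P = P*X + a
--
--     return P
-- ===== SOURCE B (Python) =====
-- def hornersRule(X, A):
--     result = 0
--     power = 1
--     for digit in reversed(A):
--         if digit.isdigit():
--             a = int(digit)
--         else:
--             a = ord(digit) - ord("a") + 10
--         result += a * power
--         power *= X
--     return result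
-- ===== Notes on version B (the rewrite author's own statement) =====
-- stated objective: alternative
-- what changed: Replaces Horner's nested multiply-add left-to-right pass with a right-to-left sum-of-powers evaluation that maintains a running power of X alongside the running total.
import Mathlib
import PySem

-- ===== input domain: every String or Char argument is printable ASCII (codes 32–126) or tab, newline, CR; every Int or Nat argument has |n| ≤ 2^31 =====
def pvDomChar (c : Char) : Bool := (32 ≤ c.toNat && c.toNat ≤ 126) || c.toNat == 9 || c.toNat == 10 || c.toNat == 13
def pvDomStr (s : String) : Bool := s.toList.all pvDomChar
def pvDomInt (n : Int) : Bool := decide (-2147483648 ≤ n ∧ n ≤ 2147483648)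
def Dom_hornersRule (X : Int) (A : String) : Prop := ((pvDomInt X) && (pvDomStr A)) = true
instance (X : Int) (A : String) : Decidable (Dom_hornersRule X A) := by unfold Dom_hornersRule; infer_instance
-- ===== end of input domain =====

-- B evaluates the polynomial as a right-to-left sum of value·X^k instead of Horner's nested multiply-add; alternative decomposition, same cost.

-- ===== PORT A =====
-- per-character value: int(digit) on a digit character is its code minus 48 (exact); else ord(digit)-ord('a')+10
def pvVal (c : Char) : Int :=
  if PySem.Chars.isdigit c then (c.toNat : Int) - 48
  else (c.toNat : Int) - 97 + 10

def hornersRule (X : Int) (A : String) : Int :=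
  A.toList.foldl (fun P digit => P * X + pvVal digit) 0

-- ===== PORT B =====
def hornersRule_alt (X : Int) (A : String) : Int :=
  (A.toList.reverse.foldl
    (fun (s : Int × Int) digit => (s.1 + pvVal digit * s.2, s.2 * X)) (0, 1)).1

-- ===== PRECONDITION & SPEC =====
def Spec_hornersRule (X : Int) (A : String) (out : Int) : Prop := out = hornersRule_alt X A
instance (X : Int) (A : String) (out : Int) : Decidable (Spec_hornersRule X A out) := by unfold Spec_hornersRule; infer_instance

-- ===== CLAIM (what is proved, stated in full; the proofs are below) =====
def Claim_equal_hornersRule : Prop := ∀ (X : Int) (A : String), Dom_hornersRule X A → Spec_hornersRule X A (hornersRule X A)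

-- ===== LEMMAS AND PROOFS =====
theorem horner_eq_powsum (X : Int) (l : List Char) : ∀ P : Int,
    l.foldl (fun P digit => P * X + pvVal digit) P
      = (l.reverse.foldl
          (fun (s : Int × Int) digit => (s.1 + pvVal digit * s.2, s.2 * X)) (0, 1)).1
        + P * (l.reverse.foldl
          (fun (s : Int × Int) digit => (s.1 + pvVal digit * s.2, s.2 * X)) (0, 1)).2 := by
  induction l with
  | nil => intro P; simp
  | cons c t ih =>
      intro P
      simp only [List.foldl_cons, List.reverse_cons, List.foldl_concat]
      rw [ih]
      ring

-- ===== VERDICT (by name: the statement is the Claim_ definition above) =====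
theorem hornersRule_spec : Claim_equal_hornersRule := by
  intro X A _
  unfold Spec_hornersRule hornersRule hornersRule_alt
  rw [horner_eq_powsum]
  ring
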